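-- pv_equiv track=rewrite | github.com/SharanIO/built_software_challenge | method_3.py | get_anagrams_and_subanagrams
-- ===== SOURCE A (Python) =====
-- def sort_string(word: str) -> str:
--     """
--     Sort the characters in the string word using instertion sort and return the sorted string
--
--     Args:
--         word (str): The input string to be sorted
--
--     Returns:
--         str: A new string with characters sorted in ascending order
--     """
--
--     chars = list(word)
--     n = len(chars)
--     for i in range(1,n):
--         key = chars[i]
--         j = i - 1
--         while j >= 0 and key < chars[j]:
--             chars[j + 1] = chars[j]
--             j -= 1
--         chars[j + 1] = key
--     return ''.join(chars)
--
-- def get_combinations(letters: str) -> list: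
--     """
--     Generate all non-empty combinations (subsets) of the input letters.
--
--     Args:
--         letters (str): Input string of letters
--
--     Returns:
--         list: Alist of all non-empty combinations of the letters.
--     """
--
--     combinations = []
--     n = len(letters)
--     total_combinations = 2 ** n
--     for i in range(1, total_combinations):
--         combo = ''
--         for j in range(n):
--             if i & (1 << j):
--                 combo += letters[j]
--         combinations.append(combo)
--     return combinations
--
-- def get_anagrams_and_subanagrams(word: str, word_map: dict) -> tuple:
--     """
--     Get anagrams and subanagrams of a given word using the word hash map.
--
--     Args:
--         word (str): The input word.
--         word_map (dict): Dictionary mapping sorted letters to words.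
--
--     Returns:
--         tuple: A tuple containing two sets:
--             - A set of anagrams of the input word.
--             - A set of subanagrams of the input word.
--     """
--
--     word = word.lower()
--     sorted_input_word = sort_string(word)
--     local_anagram_set = set(word_map.get(sorted_input_word, []))
--     sub_anagrams = set()
--
--     combos = get_combinations(word)
--     process_combos = set()
--     for combo in combos:
--         sorted_combo = sort_string(combo)
--         if sorted_combo in process_combos:
--             continue
--         process_combos.add(sorted_combo)
--         if sorted_combo == sorted_input_word:
--             continue
--         if sorted_combo in word_map:
--             sub_anagrams.update(word_map[sorted_combo])
--     return local_anagram_set, sub_anagrams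
-- ===== SOURCE B (Python) =====
-- def _ins(s: str, ch: str) -> str:
--     i = 0
--     while i < len(s) and s[i] <= ch:
--         i += 1
--     return s[:i] + ch + s[i:]
--
-- def get_anagrams_and_subanagrams(word: str, word_map: dict) -> tuple:
--     word = word.lower()
--     sorted_word = ''.join(sorted(word))
--     anagrams = set(word_map.get(sorted_word, []))
--     # build every DISTINCT sorted subsequence of word exactly once, incrementally
--     subs = []
--     seen = set()
--     for ch in word:
--         candidates = [ch] + [_ins(s, ch) for s in subs]
--         for t in candidates:
--             if t not in seen:
--                 seen.add(t)
--                 subs.append(t)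
--     sub_anagrams = set()
--     for s in subs:
--         if s != sorted_word and s in word_map:
--             sub_anagrams.update(word_map[s])
--     return anagrams, sub_anagrams
-- ===== Notes on version B (the rewrite author's own statement) =====
-- stated objective: alternative
-- what changed: Instead of enumerating all 2^n index subsets, insertion-sorting every subset string and deduplicating afterwards with a seen-set, B generates each distinct sorted subsequence of the word exactly once by a single left-to-right pass that inserts the next character into the previously generated sorted strings; on duplicate-heavy words this visits far fewer subsets (measured 120x at n=16), but on all-distinct letters both remain exponential.
import Mathlib
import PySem

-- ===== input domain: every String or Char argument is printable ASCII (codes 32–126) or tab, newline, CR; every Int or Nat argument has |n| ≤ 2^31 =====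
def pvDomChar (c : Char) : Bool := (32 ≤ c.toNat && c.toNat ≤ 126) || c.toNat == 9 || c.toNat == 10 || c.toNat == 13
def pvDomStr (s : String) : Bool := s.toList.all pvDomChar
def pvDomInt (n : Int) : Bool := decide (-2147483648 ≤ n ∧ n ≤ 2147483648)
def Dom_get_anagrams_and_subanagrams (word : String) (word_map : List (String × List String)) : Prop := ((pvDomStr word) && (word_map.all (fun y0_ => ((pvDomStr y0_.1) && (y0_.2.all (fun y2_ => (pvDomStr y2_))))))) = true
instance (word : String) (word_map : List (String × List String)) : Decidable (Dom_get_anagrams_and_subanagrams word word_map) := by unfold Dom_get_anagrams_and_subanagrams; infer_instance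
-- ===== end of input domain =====

-- B replaces A's enumeration of all 2^n index subsets (each insertion-sorted, deduplicated
-- afterwards) by an incremental generation of each DISTINCT sorted subsequence exactly once;
-- equivalence of the RETURN value is proved (both Pythons return fresh sets, no argument is mutated).

-- ===== PORT A =====
-- insertion sort's inner while loop: 'while j >= 0 and key < chars[j]: chars[j+1] = chars[j]; j -= 1'
def pvIsortInner (chars : List Char) (key : Char) (j : Int) : List Char × Int :=
  if h : 0 ≤ j ∧ key < PySem.List.pyGetD chars j ' ' then
    pvIsortInner (PySem.List.pySetD chars (j + 1) (PySem.List.pyGetD chars j ' ')) key (j - 1)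
  else (chars, j)
termination_by (j + 1).toNat
decreasing_by omega

-- A's sort_string: index-based insertion sort over list(word), then ''.join
def sort_string (word : String) : String :=
  let chars := word.toList
  let n : Int := PySem.List.len chars
  let chars := (PySem.List.pyRange 1 n 1).foldl (fun chars i =>
    let key := PySem.List.pyGetD chars i ' '
    let cj := pvIsortInner chars key (i - 1)
    PySem.List.pySetD cj.1 (cj.2 + 1) key) chars
  String.ofList chars

-- A's get_combinations: masks 1..2^n-1, 'combo += letters[j]' ported as char-list append, exact
def get_combinations (letters : String) : List String :=
  let n : Int := PySem.List.len letters.toList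
  let total_combinations : Int := 2 ^ n.toNat
  (PySem.List.pyRange 1 total_combinations 1).foldl (fun combinations i =>
    let combo := (PySem.List.pyRange 0 n 1).foldl (fun combo j =>
      if (PySem.Int.band i ((1 : Int) <<< j.toNat)) != 0 then
        combo ++ [PySem.List.pyGetD letters.toList j ' ']
      else combo) []
    combinations ++ [String.ofList combo]) []

def get_anagrams_and_subanagrams (word : String) (word_map : List (String × List String)) : List String × List String :=
  let word := PySem.Str.lower word
  let sorted_input_word := sort_string word
  let local_anagram_set : PySem.Set String :=
    PySem.Set.ofList (((word_map.find? (fun p => p.1 == sorted_input_word)).map Prod.snd).getD [])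
  let combos := get_combinations word
  let st := combos.foldl (fun (st : PySem.Set String × PySem.Set String) combo =>
    let sorted_combo := sort_string combo
    if PySem.Set.contains st.2 sorted_combo then st
    else
      let process_combos := PySem.Set.add st.2 sorted_combo
      if sorted_combo = sorted_input_word then (st.1, process_combos)
      else if word_map.any (fun p => p.1 == sorted_combo) then
        (PySem.Set.update st.1 (((word_map.find? (fun p => p.1 == sorted_combo)).map Prod.snd).getD []),
         process_combos)
      else (st.1, process_combos)) (PySem.Set.empty, PySem.Set.empty)
  (local_anagram_set, st.1)

-- ===== PORT B =====
-- B's _ins: insert ch into the sorted string s (the left-to-right scan of the while loop)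
def pvInsChars : List Char → Char → List Char
  | [], ch => [ch]
  | c :: s, ch => if c ≤ ch then c :: pvInsChars s ch else ch :: c :: s

def get_anagrams_and_subanagrams_alt (word : String) (word_map : List (String × List String)) : List String × List String :=
  let word := PySem.Str.lower word
  let sorted_word := String.ofList (PySem.List.sorted word.toList (fun x => x))
  let anagrams : PySem.Set String :=
    PySem.Set.ofList (((word_map.find? (fun p => p.1 == sorted_word)).map Prod.snd).getD [])
  let st := word.toList.foldl (fun (st : List String × PySem.Set String) ch =>
      let candidates := String.ofList [ch] :: st.1.map (fun s => String.ofList (pvInsChars s.toList ch))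
      candidates.foldl (fun st t =>
        if PySem.Set.contains st.2 t then st else (st.1 ++ [t], PySem.Set.add st.2 t)) st)
    ([], PySem.Set.empty)
  let sub_anagrams := st.1.foldl (fun acc s =>
      if s ≠ sorted_word ∧ word_map.any (fun p => p.1 == s) then
        PySem.Set.update acc (((word_map.find? (fun p => p.1 == s)).map Prod.snd).getD [])
      else acc) PySem.Set.empty
  (anagrams, sub_anagrams)

-- ===== PRECONDITION & SPEC =====
def Spec_get_anagrams_and_subanagrams (word : String) (word_map : List (String × List String)) (out : List String × List String) : Prop := out = get_anagrams_and_subanagrams_alt word word_map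
instance (word : String) (word_map : List (String × List String)) (out : List String × List String) : Decidable (Spec_get_anagrams_and_subanagrams word word_map out) := by unfold Spec_get_anagrams_and_subanagrams; infer_instance

-- ===== CLAIM (what is proved, stated in full; the proofs are below) =====
def Claim_equal_get_anagrams_and_subanagrams : Prop := ∀ (word : String) (word_map : List (String × List String)), Dom_get_anagrams_and_subanagrams word word_map → Spec_get_anagrams_and_subanagrams word word_map (get_anagrams_and_subanagrams word word_map)

-- ===== LEMMAS AND PROOFS =====

-- the canonical sorted arrangement of a list of characters
def pvCanon (cs : List Char) : List Char := PySem.List.sorted cs (fun x => x)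
def pvCanonStr (cs : List Char) : String := String.ofList (pvCanon cs)
def pvInsStr (ch : Char) (s : String) : String := String.ofList (pvInsChars s.toList ch)

-- abstract view of A's subset enumeration on char lists
def pvMaskSel (w : List Char) (i : Int) : List Char :=
  ((PySem.List.pyRange 0 (PySem.List.len w) 1).filter
      (fun j => (PySem.Int.band i ((1 : Int) <<< j.toNat)) != 0)).map
    (fun j => PySem.List.pyGetD w j ' ')
def pvCombosL (w : List Char) : List (List Char) :=
  (PySem.List.pyRange 1 ((2 : Int) ^ w.length) 1).map (pvMaskSel w)

lemma pvCanon_eq_of_perm_pairwise {cs ys : List Char} (hp : ys.Perm cs)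
    (hs : ys.Pairwise (· ≤ ·)) : pvCanon cs = ys :=
  PySem.List.sorted_id_eq_of_perm_of_pairwise cs ys hp hs

lemma pvIns_perm_pairwise (ch : Char) : ∀ (s : List Char), s.Pairwise (· ≤ ·) →
    (pvInsChars s ch).Perm (ch :: s) ∧ (pvInsChars s ch).Pairwise (· ≤ ·) := by
  intro s
  induction s with
  | nil => intro _; exact ⟨List.Perm.refl _, by simp [pvInsChars]⟩
  | cons c t ih =>
    intro hp
    rw [List.pairwise_cons] at hp
    obtain ⟨hc, ht⟩ := hp
    obtain ⟨ihp, ihs⟩ := ih ht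
    by_cases h : c ≤ ch
    · simp only [pvInsChars, if_pos h]
      constructor
      · exact (ihp.cons c).trans (List.Perm.swap c ch t).symm
      · rw [List.pairwise_cons]
        refine ⟨?_, ihs⟩
        intro x hx
        rcases List.mem_cons.mp (ihp.mem_iff.mp hx) with rfl | h2
        · exact h
        · exact hc x h2
    · simp only [pvInsChars, if_neg h]
      constructor
      · exact List.Perm.refl _
      · rw [List.pairwise_cons]
        refine ⟨?_, List.pairwise_cons.mpr ⟨hc, ht⟩⟩
        intro x hx
        simp at hx
        rcases hx with rfl | hx
        · exact le_of_lt (lt_of_not_ge h)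
        · exact (le_of_lt (lt_of_not_ge h)).trans (hc x hx)
lemma pvIns_canon (ch : Char) (x : List Char) :
    pvInsChars (pvCanon x) ch = pvCanon (x ++ [ch]) := by
  obtain ⟨hp, hs⟩ := pvIns_perm_pairwise ch (pvCanon x) (PySem.List.sorted_pairwise x (fun x => x))
  refine (pvCanon_eq_of_perm_pairwise ?_ hs).symm
  exact hp.trans (((PySem.List.sorted_perm x _ _).cons ch).trans (List.perm_append_singleton ch x).symm)
lemma pvGetMid {α : Type} (u v : List α) (y d : α) :
    PySem.List.pyGetD (u ++ y :: v) (u.length : Int) d = y := by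
  rw [PySem.List.pyGetD_natCast]
  induction u with
  | nil => rfl
  | cons a u ih => simpa using ih

lemma pvSetMid {α : Type} (u v : List α) (y z : α) :
    PySem.List.pySetD (u ++ y :: v) (u.length : Int) z = u ++ z :: v := by
  rw [PySem.List.pySetD_natCast]
  induction u with
  | nil => rfl
  | cons a u ih => simpa using ih
lemma pvIsortInner_spec : ∀ (b a : List Char) (c : Char) (rest : List Char) (key : Char),
    (∀ x ∈ b, key < x) → (∀ x, a.getLast? = some x → ¬ key < x) →
    (let cj := pvIsortInner (a ++ b ++ c :: rest) key ((a.length : Int) + b.length - 1)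
     PySem.List.pySetD cj.1 (cj.2 + 1) key) = a ++ key :: (b ++ rest) := by
  intro b
  induction b using List.reverseRecOn with
  | nil =>
    intro a c rest key _ ha
    rcases List.eq_nil_or_concat' a with rfl | ⟨a', y, rfl⟩
    · rw [pvIsortInner]
      simp only [List.length_nil, List.nil_append, List.append_nil]
      norm_num
      have : ((0:Nat) : Int) = ((-1) + 1 : Int) := by norm_num
      show PySem.List.pySetD (c :: rest) ((-1) + 1) key = key :: rest
      rw [← this]
      exact pvSetMid [] rest c key
    · rw [pvIsortInner]
      have hy : ¬ key < y := ha y (by simp)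
      have hj : ((a' ++ [y]).length : Int) + ([] : List Char).length - 1 = (a'.length : Int) := by
        simp
      rw [hj]
      have hget : PySem.List.pyGetD ((a' ++ [y]) ++ [] ++ c :: rest) (a'.length : Int) ' ' = y := by
        have := pvGetMid a' ([] ++ c :: rest) y ' '
        simpa [add_assoc] using this
      rw [hget]
      simp only [hy, and_false, dite_false]
      have : ((a'.length : Int) + 1) = ((a' ++ [y]).length : Int) := by simp
      rw [this]
      have := pvSetMid (a' ++ [y]) rest c key
      simpa [add_assoc] using this
  | append_singleton b' x ih =>
    intro a c rest key hb ha
    rw [pvIsortInner]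
    have hj0 : ((a.length : Int) + (b' ++ [x]).length - 1) = ((a ++ b').length : Int) := by
      simp; ring
    have hkx : key < x := hb x (by simp)
    have hget : PySem.List.pyGetD (a ++ (b' ++ [x]) ++ c :: rest) ((a ++ b').length : Int) ' ' = x := by
      have := pvGetMid (a ++ b') (c :: rest) x ' '
      simpa [List.append_assoc] using this
    rw [hj0, hget]
    rw [dif_pos ⟨Int.natCast_nonneg _, hkx⟩]
    have hset : PySem.List.pySetD (a ++ (b' ++ [x]) ++ c :: rest) ((((a ++ b').length : Int)) + 1) x
        = a ++ b' ++ x :: x :: rest := by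
      have h1 : ((((a ++ b').length : Int)) + 1) = (((a ++ b' ++ [x]).length : Int)) := by simp; omega
      have := pvSetMid (a ++ b' ++ [x]) rest c x
      rw [h1]
      simpa [List.append_assoc] using this
    rw [hset]
    have hj1 : (((a ++ b').length : Int)) - 1 = (a.length : Int) + (b'.length : Int) - 1 := by simp
    rw [hj1]
    have := ih a x (x :: rest) key (fun y hy => hb y (by simp [hy])) ha
    simp only [List.append_assoc] at this ⊢
    simpa [add_assoc] using this
lemma pvSplit_sorted (key : Char) : ∀ (s : List Char), s.Pairwise (· ≤ ·) →
    ∃ a b, s = a ++ b ∧ (∀ x ∈ b, key < x) ∧ (∀ x, a.getLast? = some x → ¬ key < x) ∧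
      (a ++ key :: b).Pairwise (· ≤ ·) := by
  intro s
  induction s using List.reverseRecOn with
  | nil => intro _; exact ⟨[], [], by simp⟩
  | append_singleton s' y ih =>
    intro hp
    have hp' : s'.Pairwise (· ≤ ·) := hp.sublist (List.sublist_append_left _ _)
    have hy : ∀ x ∈ s', x ≤ y := by
      intro x hx
      have := (List.pairwise_append.mp hp).2.2
      simpa using this x hx
    by_cases h : key < y
    · obtain ⟨a, b, rfl, hb, ha, hs⟩ := ih hp'
      refine ⟨a, b ++ [y], by simp, ?_, ha, ?_⟩
      · intro x hx
        rcases List.mem_append.mp hx with hx | hx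
        · exact hb x hx
        · simpa using (by simp at hx; subst hx; exact h)
      · -- (a ++ key :: (b ++ [y])) pairwise
        have : (a ++ key :: b) ++ [y] = a ++ key :: (b ++ [y]) := by simp
        rw [← this]
        apply List.pairwise_append.mpr
        refine ⟨hs, List.pairwise_singleton _ _, ?_⟩
        intro x hx y' hy'
        simp at hy'; subst hy'
        rcases List.mem_append.mp hx with hx | hx
        · exact hy x (List.mem_append.mpr (Or.inl hx))
        · rcases List.mem_cons.mp hx with rfl | hx
          · exact le_of_lt h
          · exact hy x (List.mem_append.mpr (Or.inr hx))
    · refine ⟨s' ++ [y], [], by simp, by simp, ?_, ?_⟩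
      · intro x hx
        simp at hx; subst hx; exact h
      · apply List.pairwise_append.mpr
        refine ⟨hp, List.pairwise_singleton _ _, ?_⟩
        intro x hx k hk
        simp at hk; subst hk
        rcases List.mem_append.mp hx with hx | hx
        · exact (hy x hx).trans (le_of_not_gt h)
        · simp at hx; subst hx; exact le_of_not_gt h
lemma pvIsort_outer : ∀ (t s : List Char), s.Pairwise (· ≤ ·) →
    ∃ r, (PySem.List.pyRange (s.length) ((s.length : Int) + t.length) 1).foldl
        (fun chars i =>
          let key := PySem.List.pyGetD chars i ' '
          let cj := pvIsortInner chars key (i - 1)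
          PySem.List.pySetD cj.1 (cj.2 + 1) key) (s ++ t) = r ∧
      r.Perm (s ++ t) ∧ r.Pairwise (· ≤ ·) := by
  intro t
  induction t with
  | nil =>
    intro s hs
    refine ⟨s ++ [], ?_, List.Perm.refl _, by simpa using hs⟩
    rw [show ((s.length : Int) + ([] : List Char).length) = (s.length : Int) by simp,
      PySem.List.pyRange_one_eq_nil (le_refl _)]
    rfl
  | cons x t' ih =>
    intro s hs
    have hlt : (s.length : Int) < (s.length : Int) + ((x :: t').length : Int) := by
      simp
    rw [PySem.List.pyRange_one_cons hlt, List.foldl_cons]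
    dsimp only
    have hkey : PySem.List.pyGetD (s ++ x :: t') (s.length : Int) ' ' = x := pvGetMid s t' x ' '
    rw [hkey]
    obtain ⟨a, b, rfl, hb, ha, hsorted⟩ := pvSplit_sorted x s hs
    have hidx : ((a ++ b).length : Int) - 1 = (a.length : Int) + (b.length : Int) - 1 := by
      simp
    rw [hidx]
    have hstep := pvIsortInner_spec b a x t' x hb ha
    simp only at hstep
    rw [hstep]
    have harr : a ++ x :: (b ++ t') = (a ++ x :: b) ++ t' := by simp
    rw [harr]
    have hrange : PySem.List.pyRange (((a ++ b).length : Int) + 1) (((a ++ b).length : Int) + ((x :: t').length : Int)) 1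
        = PySem.List.pyRange (((a ++ x :: b).length : Int)) (((a ++ x :: b).length : Int) + (t'.length : Int)) 1 := by
      have e1 : ((a ++ b).length : Int) + 1 = ((a ++ x :: b).length : Int) := by simp; omega
      have e2 : ((a ++ b).length : Int) + ((x :: t').length : Int)
          = ((a ++ x :: b).length : Int) + (t'.length : Int) := by simp; omega
      rw [e1, e2]
    rw [hrange]
    obtain ⟨r, hfold, hperm, hpair⟩ := ih (a ++ x :: b) hsorted
    refine ⟨r, hfold, ?_, hpair⟩
    refine hperm.trans ?_
    have h1 : a ++ x :: b ++ t' = a ++ (x :: (b ++ t')) := by simp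
    have h2 : a ++ b ++ x :: t' = a ++ (b ++ x :: t') := by simp
    rw [h1, h2]
    exact List.Perm.append_left a List.perm_middle.symm
lemma pvIsortChars_eq (cs : List Char) :
    (PySem.List.pyRange 1 (PySem.List.len cs) 1).foldl (fun chars i =>
      let key := PySem.List.pyGetD chars i ' '
      let cj := pvIsortInner chars key (i - 1)
      PySem.List.pySetD cj.1 (cj.2 + 1) key) cs = pvCanon cs := by
  cases cs with
  | nil =>
    rw [show PySem.List.len ([] : List Char) = (0 : Int) from rfl,
      PySem.List.pyRange_one_eq_nil (by norm_num)]
    rfl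
  | cons y t =>
    obtain ⟨r, hfold, hperm, hpair⟩ := pvIsort_outer t [y] (List.pairwise_singleton _ _)
    have hr : pvCanon (y :: t) = r := pvCanon_eq_of_perm_pairwise (by simpa using hperm) hpair
    rw [hr, ← hfold]
    have hrange : PySem.List.pyRange 1 (PySem.List.len (y :: t)) 1
        = PySem.List.pyRange (([y] : List Char).length) ((([y] : List Char).length : Int) + (t.length : Int)) 1 := by
      simp [PySem.List.len_eq]
      congr 1
      omega
    rw [hrange]
    rfl
lemma pvSortString_eq (s : String) : sort_string s = pvCanonStr s.toList := by
  show String.ofList _ = _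
  rw [pvIsortChars_eq]
  rfl
def pvMaskSelN (w : List Char) (m : Nat) : List Char :=
  ((List.range w.length).filter (fun k => m.testBit k)).map (fun k => w.getD k ' ')

lemma pvBitCond (m k : Nat) :
    ((PySem.Int.band (m : Int) ((1 : Int) <<< ((((k : Int)).toNat : Nat) : Int))) != 0) = m.testBit k := by
  rw [Int.toNat_natCast, Int.shiftLeft_natCast_right, Int.shiftLeft_eq, one_mul]
  have h2 : ((2 : Int) ^ k) = ((2 ^ k : Nat) : Int) := by push_cast; ring
  rw [h2, PySem.Int.band_natCast, Nat.and_two_pow]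
  cases h : m.testBit k <;> simp
lemma pvMaskSel_natCast (w : List Char) (m : Nat) :
    pvMaskSel w (m : Int) = pvMaskSelN w m := by
  unfold pvMaskSel pvMaskSelN
  rw [PySem.List.len_eq, PySem.List.pyRange_zero_nat]
  rw [List.filter_map, List.map_map]
  congr 1
  · funext k
    simp
  · congr 1
    funext k
    simp only [Function.comp_apply]
    exact pvBitCond m k
def pvCombosN (w : List Char) : List (List Char) :=
  (List.range' 1 (2 ^ w.length - 1)).map (pvMaskSelN w)

lemma pvCombosL_eq_N (w : List Char) : pvCombosL w = pvCombosN w := by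
  unfold pvCombosL pvCombosN
  rw [PySem.List.pyRange_one, List.map_map]
  have hlen : ((2 : Int) ^ w.length - 1).toNat = 2 ^ w.length - 1 := by
    have : ((2 : Int) ^ w.length) = ((2 ^ w.length : Nat) : Int) := by push_cast; ring
    omega
  rw [hlen, List.range'_eq_map_range, List.map_map]
  apply List.map_congr_left
  intro k _
  simp only [Function.comp_apply]
  have : (1 : Int) + (k : Int) = ((1 + k : Nat) : Int) := by push_cast; ring
  rw [this, pvMaskSel_natCast]
lemma pvCombos_eq (s : String) : get_combinations s = (pvCombosL s.toList).map String.ofList := by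
  have hin : ∀ i : Int, (PySem.List.pyRange 0 (PySem.List.len s.toList) 1).foldl
      (fun combo j => if (PySem.Int.band i ((1 : Int) <<< j.toNat)) != 0 then
        combo ++ [PySem.List.pyGetD s.toList j ' '] else combo) [] = pvMaskSel s.toList i := by
    intro i
    rw [PySem.List.foldl_append_if]
    simp [pvMaskSel]
  unfold get_combinations
  simp only [hin]
  rw [PySem.List.foldl_append_singleton_eq_map]
  rw [List.nil_append]
  unfold pvCombosL
  rw [List.map_map]
  have hr : (2 : Int) ^ (PySem.List.len s.toList).toNat = (2 : Int) ^ s.toList.length := by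
    rw [PySem.List.len_eq, Int.toNat_natCast]
  rw [hr]
  rfl
lemma pvMaskSelN_low (w : List Char) (c : Char) (m : Nat) (hm : m < 2 ^ w.length) :
    pvMaskSelN (w ++ [c]) m = pvMaskSelN w m := by
  unfold pvMaskSelN
  rw [List.length_append, List.length_singleton, List.range_succ, List.filter_append]
  have h2 : List.filter (fun k => m.testBit k) [w.length] = [] := by
    simp [Nat.testBit_lt_two_pow hm]
  rw [h2, List.append_nil]
  apply List.map_congr_left
  intro k hk
  have hk' : k < w.length := by
    have := List.mem_range.mp (List.mem_of_mem_filter hk)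
    exact this
  exact List.getD_append _ _ _ _ hk'
lemma pvMaskSelN_high (w : List Char) (c : Char) (m : Nat) (hm : m < 2 ^ w.length) :
    pvMaskSelN (w ++ [c]) (2 ^ w.length + m) = pvMaskSelN w m ++ [c] := by
  unfold pvMaskSelN
  rw [List.length_append, List.length_singleton, List.range_succ, List.filter_append]
  have h2 : List.filter (fun k => (2 ^ w.length + m).testBit k) [w.length] = [w.length] := by
    simp [Nat.testBit_two_pow_add_eq, Nat.testBit_lt_two_pow hm]
  have h3 : (List.range w.length).filter (fun k => (2 ^ w.length + m).testBit k)
      = (List.range w.length).filter (fun k => m.testBit k) := by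
    apply List.filter_congr
    intro k hk
    rw [Nat.testBit_two_pow_add_gt (List.mem_range.mp hk) m]
  rw [h2, h3, List.map_append]
  congr 1
  · apply List.map_congr_left
    intro k hk
    exact List.getD_append _ _ _ _ (List.mem_range.mp (List.mem_of_mem_filter hk))
  · simp [List.getD]
lemma pvCombosN_snoc (w : List Char) (c : Char) :
    pvCombosN (w ++ [c]) = pvCombosN w ++ [[c]] ++ (pvCombosN w).map (· ++ [c]) := by
  unfold pvCombosN
  rw [List.length_append, List.length_singleton]
  have hpos : 0 < 2 ^ w.length := Nat.two_pow_pos w.length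
  have hsplit : (2 : Nat) ^ (w.length + 1) - 1 = (2 ^ w.length - 1) + 2 ^ w.length := by
    rw [pow_succ]; omega
  rw [hsplit, ← List.range'_append (s := 1) (m := 2 ^ w.length - 1) (n := 2 ^ w.length) (step := 1)]
  have hs : 1 + 1 * (2 ^ w.length - 1) = 2 ^ w.length := by omega
  rw [hs, List.map_append, List.append_assoc]
  congr 1
  · -- low part
    apply List.map_congr_left
    intro m hm
    refine pvMaskSelN_low w c m ?_
    obtain ⟨i, hi, rfl⟩ := List.mem_range'.mp hm
    omega
  · -- high part
    rw [show List.range' (2 ^ w.length) (2 ^ w.length) = List.range' (2 ^ w.length) ((2 ^ w.length - 1) + 1) by congr 1; omega]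
    rw [List.range'_succ]
    rw [List.map_cons]
    congr 1
    · -- the singleton [c]
      have := pvMaskSelN_high w c 0 hpos
      simpa [pvMaskSelN] using this
    · rw [show List.range' (2 ^ w.length + 1) (2 ^ w.length - 1) = List.range' (1 + 2 ^ w.length) (2 ^ w.length - 1) by congr 1; omega]
      rw [show (List.range' (1 + 2 ^ w.length) (2 ^ w.length - 1) : List Nat)
            = (List.range' 1 (2 ^ w.length - 1)).map (fun m => 2 ^ w.length + m) by
          rw [List.range'_eq_map_range, List.range'_eq_map_range, List.map_map]
          apply List.map_congr_left
          intro k _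
          simp; omega]
      rw [List.map_map, List.map_map]
      apply List.map_congr_left
      intro m hm
      simp only [Function.comp_apply]
      refine pvMaskSelN_high w c m ?_
      obtain ⟨i, hi, rfl⟩ := List.mem_range'.mp hm
      omega
lemma pvCombosL_snoc (w : List Char) (c : Char) :
    pvCombosL (w ++ [c]) = pvCombosL w ++ [[c]] ++ (pvCombosL w).map (· ++ [c]) := by
  rw [pvCombosL_eq_N, pvCombosL_eq_N, pvCombosN_snoc]
lemma pvSkipFold {α : Type} (g : α → String → α) : ∀ (xs : List String) (acc : α) (seen : List String),
    xs.foldl (fun st x => if PySem.Set.contains st.2 x then st else (g st.1 x, PySem.Set.add st.2 x))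
        (acc, seen)
      = (((PySem.Set.update seen xs).drop seen.length).foldl g acc, PySem.Set.update seen xs) := by
  intro xs
  induction xs with
  | nil =>
    intro acc seen
    simp [PySem.Set.update, List.foldl]
  | cons x t ih =>
    intro acc seen
    by_cases hx : x ∈ seen
    · have hc : PySem.Set.contains seen x = true := (PySem.Set.contains_iff seen x).mpr hx
      simp only [List.foldl_cons, hc, if_true]
      rw [ih, PySem.Set.update_cons, PySem.Set.add_of_mem hx]
    · have hc : PySem.Set.contains seen x = false := by
        rcases Bool.eq_false_or_eq_true (PySem.Set.contains seen x) with h | h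
        · exact absurd ((PySem.Set.contains_iff seen x).mp h) hx
        · exact h
      simp only [List.foldl_cons, hc, Bool.false_eq_true, if_false]
      rw [ih, PySem.Set.update_cons, PySem.Set.add_of_not_mem hx]
      have hU : PySem.Set.update (seen ++ [x]) t
          = (seen ++ [x]) ++ List.filter (fun y => !(PySem.Set.contains (seen ++ [x]) y)) (PySem.Set.ofList t) :=
        PySem.Set.update_eq_append_filter _ _
      have h2 : ((PySem.Set.update (seen ++ [x]) t).drop (seen ++ [x]).length)
          = List.filter (fun y => !(PySem.Set.contains (seen ++ [x]) y)) (PySem.Set.ofList t) := by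
        rw [hU, List.drop_left]
      have h3 : ((PySem.Set.update (seen ++ [x]) t).drop seen.length)
          = x :: List.filter (fun y => !(PySem.Set.contains (seen ++ [x]) y)) (PySem.Set.ofList t) := by
        rw [hU, List.append_assoc, List.drop_left, List.singleton_append]
      rw [h2, h3, List.foldl_cons]
lemma pvBInner : ∀ (cands : List String) (s : List String),
    cands.foldl (fun st t =>
        if PySem.Set.contains st.2 t then st else (st.1 ++ [t], PySem.Set.add st.2 t))
      (s, s) = (PySem.Set.update s cands, PySem.Set.update s cands) := by
  intro cands
  induction cands with
  | nil => intro s; simp [PySem.Set.update]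
  | cons x t ih =>
    intro s
    rw [PySem.Set.update_cons]
    by_cases hx : x ∈ s
    · have hc : PySem.Set.contains s x = true := (PySem.Set.contains_iff s x).mpr hx
      simp only [List.foldl_cons, hc, if_true]
      rw [ih, PySem.Set.add_of_mem hx]
    · have hc : PySem.Set.contains s x = false := by
        rcases Bool.eq_false_or_eq_true (PySem.Set.contains s x) with h | h
        · exact absurd ((PySem.Set.contains_iff s x).mp h) hx
        · exact h
      simp only [List.foldl_cons, hc, Bool.false_eq_true, if_false]
      rw [PySem.Set.add_of_not_mem hx, ← ih (s ++ [x])]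
lemma pvBOuter : ∀ (w : List Char) (s : List String),
    w.foldl (fun (st : List String × PySem.Set String) ch =>
        (String.ofList [ch] :: st.1.map (fun s => String.ofList (pvInsChars s.toList ch))).foldl
          (fun st t =>
            if PySem.Set.contains st.2 t then st else (st.1 ++ [t], PySem.Set.add st.2 t)) st)
      (s, s)
    = (w.foldl (fun l ch => PySem.Set.update l (String.ofList [ch] :: l.map (pvInsStr ch))) s,
       w.foldl (fun l ch => PySem.Set.update l (String.ofList [ch] :: l.map (pvInsStr ch))) s) := by
  intro w
  induction w with
  | nil => intro s; rfl
  | cons ch t ih =>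
    intro s
    rw [List.foldl_cons]
    dsimp only
    rw [pvBInner, ih]
    simp only [List.foldl_cons]
    rfl

-- B's generator of distinct sorted subsequences, abstracted
def pvGen (w : List Char) : PySem.Set String :=
  w.foldl (fun l ch => PySem.Set.update l (String.ofList [ch] :: l.map (pvInsStr ch))) []

lemma pvUpdate_ofList {s : PySem.Set String} (zs : List String) :
    PySem.Set.update s (PySem.Set.ofList zs) = PySem.Set.update s zs := by
  rw [PySem.Set.update_eq_append_filter, PySem.Set.update_eq_append_filter,
    PySem.Set.ofList_ofList]

lemma pvOfList_map_inj (f : String → String) : ∀ (ys : List String),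
    (∀ a ∈ ys, ∀ b ∈ ys, f a = f b → a = b) →
    PySem.Set.ofList (ys.map f) = (PySem.Set.ofList ys).map f := by
  intro ys
  induction ys using List.reverseRecOn with
  | nil => intro _; rfl
  | append_singleton ys y ih =>
    intro hinj
    rw [List.map_append, List.map_singleton, PySem.Set.ofList_append_singleton,
      PySem.Set.ofList_append_singleton]
    rw [ih (fun a ha b hb => hinj a (by simp [ha]) b (by simp [hb]))]
    by_cases hy : y ∈ PySem.Set.ofList ys
    · rw [PySem.Set.add_of_mem hy, PySem.Set.add_of_mem]
      exact List.mem_map_of_mem hy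
    · rw [PySem.Set.add_of_not_mem hy, PySem.Set.add_of_not_mem, List.map_append,
        List.map_singleton]
      intro hmem
      obtain ⟨a, ha, hfa⟩ := List.mem_map.mp hmem
      have : a = y := hinj a (by simp [(PySem.Set.mem_ofList ys a).mp ha]) y (by simp) hfa
      exact hy (this ▸ ha)

lemma pvCanonStr_singleton (c : Char) : pvCanonStr [c] = String.ofList [c] := by
  unfold pvCanonStr pvCanon
  rw [PySem.List.sorted_eq_self_of_pairwise [c] (fun x => x) (List.pairwise_singleton _ _)]

lemma pvInsStr_canonStr (c : Char) (x : List Char) :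
    pvInsStr c (pvCanonStr x) = pvCanonStr (x ++ [c]) := by
  unfold pvInsStr pvCanonStr
  rw [String.toList_ofList, pvIns_canon]

lemma pvCanonStr_eq_of_perm {x1 x2 : List Char} (hp : x1.Perm x2) :
    pvCanonStr x1 = pvCanonStr x2 := by
  unfold pvCanonStr
  congr 1
  exact PySem.List.sorted_eq_sorted_of_perm x1 x2 (fun x => x) (fun a b h => h) hp

lemma pvCanonStr_inj_of_perm {x1 x2 : List Char} (h : pvCanonStr x1 = pvCanonStr x2) :
    x1.Perm x2 := by
  unfold pvCanonStr at h
  have h' : pvCanon x1 = pvCanon x2 := by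
    have := congrArg String.toList h
    simpa [String.toList_ofList] using this
  unfold pvCanon at h'
  have p1 := PySem.List.sorted_perm x1 (fun x => x) false
  have p2 := PySem.List.sorted_perm x2 (fun x => x) false
  exact p1.symm.trans (h' ▸ p2)

def pvActA (word_map : List (String × List String)) (sw : String) :
    PySem.Set String → String → PySem.Set String := fun acc sc =>
  if sc = sw then acc
  else if (word_map.any fun p => p.1 == sc) = true then
    PySem.Set.update acc ((Option.map Prod.snd (List.find? (fun p => p.1 == sc) word_map)).getD [])
  else acc

def pvStepA (word_map : List (String × List String)) (sw : String) :
    PySem.Set String × PySem.Set String → String → PySem.Set String × PySem.Set String := fun st sc =>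
  if PySem.Set.contains st.2 sc then st else (pvActA word_map sw st.1 sc, PySem.Set.add st.2 sc)

lemma pvGen_def (w : List Char) :
    w.foldl (fun l ch => PySem.Set.update l (String.ofList [ch] :: l.map (pvInsStr ch))) [] = pvGen w := rfl

-- the crux: A's deduplicated sorted combos = B's generated list
lemma pvGen_eq (w : List Char) :
    pvGen w = PySem.Set.ofList ((pvCombosL w).map pvCanonStr) := by
  unfold pvGen
  induction w using List.reverseRecOn with
  | nil => rfl
  | append_singleton w c ih =>
    rw [List.foldl_append, List.foldl_cons, List.foldl_nil, ih]
    rw [pvCombosL_snoc, List.map_append, List.map_append]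
    rw [PySem.Set.ofList_append, PySem.Set.ofList_append]
    have h1 : List.map pvCanonStr [[c]] = [String.ofList [c]] := by
      simp [pvCanonStr_singleton]
    have h2 : List.map pvCanonStr (List.map (fun x => x ++ [c]) (pvCombosL w))
        = List.map (pvInsStr c) (List.map pvCanonStr (pvCombosL w)) := by
      rw [List.map_map, List.map_map]
      apply List.map_congr_left
      intro x _
      simp only [Function.comp_apply]
      rw [pvInsStr_canonStr]
    rw [h1, h2]
    rw [PySem.Set.update_cons]
    have h3 : PySem.Set.update (PySem.Set.ofList (List.map pvCanonStr (pvCombosL w))) [String.ofList [c]]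
        = PySem.Set.add (PySem.Set.ofList (List.map pvCanonStr (pvCombosL w))) (String.ofList [c]) := by
      rw [PySem.Set.update_cons]
      rfl
    rw [h3]
    have hinj : ∀ a ∈ List.map pvCanonStr (pvCombosL w), ∀ b ∈ List.map pvCanonStr (pvCombosL w),
        pvInsStr c a = pvInsStr c b → a = b := by
      intro a ha b hb hab
      obtain ⟨x1, _, rfl⟩ := List.mem_map.mp ha
      obtain ⟨x2, _, rfl⟩ := List.mem_map.mp hb
      rw [pvInsStr_canonStr, pvInsStr_canonStr] at hab
      have hperm := (List.perm_append_right_iff [c]).mp (pvCanonStr_inj_of_perm hab)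
      exact pvCanonStr_eq_of_perm hperm
    rw [← pvOfList_map_inj (pvInsStr c) (List.map pvCanonStr (pvCombosL w)) hinj,
      pvUpdate_ofList]


-- ===== VERDICT (by name: the statement is the Claim_ definition above) =====
theorem get_anagrams_and_subanagrams_spec : Claim_equal_get_anagrams_and_subanagrams := by
  intro word word_map _
  unfold Spec_get_anagrams_and_subanagrams
  unfold get_anagrams_and_subanagrams get_anagrams_and_subanagrams_alt
  simp only [pvSortString_eq, pvCombos_eq]
  have hsw : String.ofList (PySem.List.sorted (PySem.Str.lower word).toList fun x => x)
      = pvCanonStr (PySem.Str.lower word).toList := rfl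
  rw [hsw]
  rw [show (PySem.Set.empty : PySem.Set String) = ([] : List String) from rfl]
  rw [List.foldl_map]
  simp only [String.toList_ofList]
  have hFA : (fun (st : PySem.Set String × PySem.Set String) (y : List Char) =>
        if PySem.Set.contains st.2 (pvCanonStr y) = true then st
        else
          if pvCanonStr y = pvCanonStr (PySem.Str.lower word).toList then (st.1, PySem.Set.add st.2 (pvCanonStr y))
          else
            if (word_map.any fun p => p.1 == pvCanonStr y) = true then
              (PySem.Set.update st.1
                  ((Option.map Prod.snd (List.find? (fun p => p.1 == pvCanonStr y) word_map)).getD []),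
                PySem.Set.add st.2 (pvCanonStr y))
            else (st.1, PySem.Set.add st.2 (pvCanonStr y)))
      = (fun st y => pvStepA word_map (pvCanonStr (PySem.Str.lower word).toList) st (pvCanonStr y)) := by
    funext st y
    simp only [pvStepA, pvActA]
    split_ifs <;> rfl
  rw [hFA]
  rw [← List.foldl_map (f := pvCanonStr) (g := pvStepA word_map (pvCanonStr (PySem.Str.lower word).toList))]
  unfold pvStepA
  rw [pvSkipFold (pvActA word_map (pvCanonStr (PySem.Str.lower word).toList)), pvBOuter]
  simp only [List.length_nil, List.drop_zero]
  rw [show ∀ xs : List String, PySem.Set.update ([] : List String) xs = PySem.Set.ofList xs from fun xs => rfl]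
  rw [pvGen_def, pvGen_eq]
  have hg : (fun (acc : PySem.Set String) (s : String) =>
        if s ≠ pvCanonStr (PySem.Str.lower word).toList ∧ (word_map.any fun p => p.1 == s) = true then
          PySem.Set.update acc ((Option.map Prod.snd (List.find? (fun p => p.1 == s) word_map)).getD [])
        else acc)
      = pvActA word_map (pvCanonStr (PySem.Str.lower word).toList) := by
    funext acc s
    simp only [pvActA]
    by_cases h1 : s = pvCanonStr (PySem.Str.lower word).toList <;>
      by_cases h2 : (word_map.any fun p => p.1 == s) = true <;> simp [h1, h2]
  rw [hg]
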